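-- pv_equiv track=rewrite | github.com/FlorenciaCorrea/lexer | lexer.py | a_llaveop
-- ===== SOURCE A (Python) =====
-- def a_llaveop (word):
-- 	s = 0
-- 	for c in word :
-- 		if s == 0 and c == '{':
-- 			s = 1
-- 		else:
-- 			s = -1
-- 			break
-- 	return s == 1
-- ===== SOURCE B (Python) =====
-- def a_llaveop(word):
--     return word == '{'
-- ===== Notes on version B (the rewrite author's own statement) =====
-- stated objective: simpler
-- what changed: Replaced the character-by-character state-machine loop with a single direct string equality test against the one-character brace token.
import Mathlib
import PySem

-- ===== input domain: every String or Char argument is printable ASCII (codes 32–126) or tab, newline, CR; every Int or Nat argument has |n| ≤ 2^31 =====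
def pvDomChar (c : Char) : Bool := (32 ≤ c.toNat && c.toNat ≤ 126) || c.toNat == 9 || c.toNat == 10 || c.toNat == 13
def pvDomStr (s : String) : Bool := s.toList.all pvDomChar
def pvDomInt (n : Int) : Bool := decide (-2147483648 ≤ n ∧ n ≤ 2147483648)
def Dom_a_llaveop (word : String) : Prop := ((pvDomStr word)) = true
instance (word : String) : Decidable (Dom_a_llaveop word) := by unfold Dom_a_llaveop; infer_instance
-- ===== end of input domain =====

-- B replaces A's per-character state-machine loop with one direct string equality test (simpler).


-- ===== PORT A =====
-- loop over the characters: s==0 and c=='{' advances to state 1, anything else sets -1 and breaks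
def aLoop : Int → List Char → Int
  | s, [] => s
  | s, c :: rest => if s == 0 && c == '{' then aLoop 1 rest else -1

def a_llaveop (word : String) : Bool := aLoop 0 word.toList == 1

-- ===== PORT B =====
-- B: direct equality test
def a_llaveop_alt (word : String) : Bool := word == "{"

-- ===== PRECONDITION & SPEC =====
def Spec_a_llaveop (word : String) (out : Bool) : Prop := out = a_llaveop_alt word
instance (word : String) (out : Bool) : Decidable (Spec_a_llaveop word out) := by unfold Spec_a_llaveop; infer_instance

-- ===== CLAIM (what is proved, stated in full; the proofs are below) =====
def Claim_equal_a_llaveop : Prop := ∀ (word : String), Dom_a_llaveop word → Spec_a_llaveop word (a_llaveop word)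

-- ===== LEMMAS AND PROOFS =====

-- ===== VERDICT (by name: the statement is the Claim_ definition above) =====
theorem aLoop_eq_one (l : List Char) : (aLoop 0 l == 1) = (l == ['{']) := by
  cases l with
  | nil => rfl
  | cons c rest =>
    by_cases hc : c = '{'
    · subst hc
      cases rest with
      | nil => rfl
      | cons d rest' => simp [aLoop]
    · simp [aLoop, hc]

theorem a_llaveop_spec : Claim_equal_a_llaveop := by
  intro word _
  show a_llaveop word = a_llaveop_alt word
  unfold a_llaveop a_llaveop_alt
  rw [aLoop_eq_one]
  have h : (word = "{") ↔ (word.toList = ['{']) := by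
    rw [show ('{'::[]) = "{".toList from rfl]
    exact ⟨fun h => h ▸ rfl, fun h => String.toList_injective h⟩
  rw [Bool.eq_iff_iff]
  simp only [beq_iff_eq]
  exact h.symm
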